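-- pv_equiv track=rewrite | github.com/wangruowen/leetcode_practice | LeetCode/79_Word_Search.py | exist_v2
-- ===== SOURCE A (Python) =====
-- def exist_v2(board, word):
--     """
--     :type board: List[List[str]]
--     :type word: str
--     :rtype: bool
--     """
--     rowlen, collen = len(board), len(board[0])
--
--     def DFS(i, j, word_index):
--         if board[i][j] == word[word_index]:
--             word_index += 1
--             if word_index == len(word):
--                 return True
--
--             for di, dj in [[-1, 0], [1, 0], [0, 1], [0, -1]]:
--                 ip, jp = i + di, j + dj
--                 if 0 <= ip < rowlen and 0 <= jp < collen and (ip, jp) not in visited: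
--                     visited.add((ip, jp))
--                     if DFS(ip, jp, word_index):
--                         return True
--                     visited.remove((ip, jp))
--         return False
--
--     for i in range(rowlen):
--         for j in range(collen):
--             visited = set([(i, j)])
--             if DFS(i, j, 0):
--                 return True
--     return False
-- ===== SOURCE B (Python) =====
-- def exist_v2(board, word):
--     """
--     :type board: List[List[str]]
--     :type word: str
--     :rtype: bool
--     """
--     rows, cols = len(board), len(board[0])
--     dirs = ((-1, 0), (1, 0), (0, 1), (0, -1))
--     for si in range(rows):
--         for sj in range(cols):
--             if board[si][sj] != word[0]:
--                 continue
--             if len(word) == 1: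
--                 return True
--             # iterative DFS: explicit stack of (cell, next direction to try)
--             on_path = {(si, sj)}
--             stack = [(si, sj, 0)]
--             while stack:
--                 i, j, d = stack[-1]
--                 if d == 4:
--                     stack.pop()
--                     on_path.discard((i, j))
--                     continue
--                 stack[-1] = (i, j, d + 1)
--                 ip, jp = i + dirs[d][0], j + dirs[d][1]
--                 k = len(stack)
--                 if 0 <= ip < rows and 0 <= jp < cols and (ip, jp) not in on_path \
--                         and board[ip][jp] == word[k]:
--                     if k + 1 == len(word):
--                         return True
--                     on_path.add((ip, jp))
--                     stack.append((ip, jp, 0))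
--     return False
-- ===== Notes on version B (the rewrite author's own statement) =====
-- stated objective: alternative
-- what changed: B replaces A's recursive backtracking DFS (inner function recursing per cell with a visited set) by an iterative depth-first search: an explicit stack of (cell, next-direction-to-try) frames advanced in a single while loop, with the word index read off as the stack depth and membership tested against the set of cells currently on the stack; the neighbor character is checked before pushing instead of at entry.
-- outside the precondition, e.g. on exist_v2([['a'], []], 'a'): A returns True, B returns True
import Mathlib
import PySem

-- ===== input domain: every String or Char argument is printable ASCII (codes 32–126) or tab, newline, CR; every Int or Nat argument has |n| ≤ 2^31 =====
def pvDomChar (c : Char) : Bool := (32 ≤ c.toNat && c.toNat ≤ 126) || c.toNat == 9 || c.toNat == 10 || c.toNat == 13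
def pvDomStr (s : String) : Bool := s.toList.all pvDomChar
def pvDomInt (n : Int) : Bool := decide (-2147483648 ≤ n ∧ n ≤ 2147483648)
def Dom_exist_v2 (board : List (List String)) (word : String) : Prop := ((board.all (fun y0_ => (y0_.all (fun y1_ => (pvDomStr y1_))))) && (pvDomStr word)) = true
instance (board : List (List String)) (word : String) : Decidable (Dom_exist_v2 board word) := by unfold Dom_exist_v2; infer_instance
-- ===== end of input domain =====

-- B replaces A's recursive backtracking DFS by an iterative depth-first search over an explicit
-- stack of (cell, next-direction) frames with a set of the cells on the current path.
-- Neither version mutates its arguments observably; equivalence is about the return value.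

-- cell read board[i][j], used only where 0 ≤ i < len(board) and 0 ≤ j < first-row length hold
def pvCell (b : List (List String)) (i j : Int) : String := (b.getD i.toNat []).getD j.toNat ""

-- ===== PORT A =====
def pvDirs : List (Int × Int) := [(-1, 0), (1, 0), (0, 1), (0, -1)]

-- A's inner DFS; fuel = word.length - word_index makes the recursion structural (never exhausted under Pre_)
def dfsA (board : List (List String)) (wl : List Char) (rowlen collen : Int) :
    Nat → List (Int × Int) → Int → Int → Nat → Bool
  | 0, _, _, _, _ => false
  | fuel + 1, visited, i, j, k =>
    if pvCell board i j = String.ofList [wl.getD k ' '] then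
      if k + 1 = wl.length then true
      else
        pvDirs.any (fun d =>
          decide (0 ≤ i + d.1 ∧ i + d.1 < rowlen ∧ 0 ≤ j + d.2 ∧ j + d.2 < collen) &&
          !(visited.contains (i + d.1, j + d.2)) &&
          dfsA board wl rowlen collen fuel ((i + d.1, j + d.2) :: visited) (i + d.1) (j + d.2) (k + 1))
    else false

def exist_v2 (board : List (List String)) (word : String) : Bool :=
  let rowlen : Int := board.length
  let collen : Int := (board.getD 0 []).length
  let wl := word.toList
  (PySem.List.pyRange 0 rowlen 1).any (fun i =>
    (PySem.List.pyRange 0 collen 1).any (fun j =>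
      dfsA board wl rowlen collen wl.length [(i, j)] i j 0))

-- ===== PORT B =====
-- Source B's while loop; fuel is a totality device only (9^len(word) steps always suffice, proved below)
def loopB (board : List (List String)) (wl : List Char) (rows cols : Int) :
    Nat → List (Int × Int × Nat) → PySem.Set (Int × Int) → Bool
  | 0, _, _ => false
  | _ + 1, [], _ => false
  | fuel + 1, (i, j, d) :: rest, onp =>
    if d = 4 then
      loopB board wl rows cols fuel rest (PySem.Set.discard onp (i, j))
    else
      let dir := pvDirs.getD d (0, 0)
      let ip := i + dir.1
      let jp := j + dir.2
      let k := rest.length + 1          -- len(stack)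
      if decide (0 ≤ ip ∧ ip < rows ∧ 0 ≤ jp ∧ jp < cols) &&
         !(PySem.Set.contains onp (ip, jp)) &&
         decide (pvCell board ip jp = String.ofList [wl.getD k ' ']) then
        if k + 1 = wl.length then true
        else
          loopB board wl rows cols fuel ((ip, jp, 0) :: (i, j, d + 1) :: rest)
            (PySem.Set.add onp (ip, jp))
      else
        loopB board wl rows cols fuel ((i, j, d + 1) :: rest) onp

def exist_v2_alt (board : List (List String)) (word : String) : Bool :=
  let rows : Int := board.length
  let cols : Int := (board.getD 0 []).length
  let wl := word.toList
  (PySem.List.pyRange 0 rows 1).any (fun si =>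
    (PySem.List.pyRange 0 cols 1).any (fun sj =>
      if pvCell board si sj ≠ String.ofList [wl.getD 0 ' '] then false
      else if wl.length = 1 then true
      else loopB board wl rows cols (9 ^ wl.length) [(si, sj, 0)]
             (PySem.Set.ofList [(si, sj)])))

-- ===== PRECONDITION & SPEC =====
-- Pre_ excludes inputs on which Python A raises IndexError (empty board, empty word, a row shorter
-- than the first row reached by the scan); on a ragged board A can also return True by early exit
-- before reaching a short row — those inputs are excluded too (see cites) since board accesses on
-- them are only conditionally defined.
def Pre_exist_v2 (board : List (List String)) (word : String) : Prop :=
  board ≠ [] ∧ word ≠ "" ∧ ∀ row ∈ board, (board.headD []).length ≤ row.length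
instance (board : List (List String)) (word : String) : Decidable (Pre_exist_v2 board word) := by
  unfold Pre_exist_v2; infer_instance

def pvWitness_exist_v2 : List (List String) × String := ([["a", "b"], ["c", "d"]], "ab")

def Spec_exist_v2 (board : List (List String)) (word : String) (out : Bool) : Prop := out = exist_v2_alt board word
instance (board : List (List String)) (word : String) (out : Bool) : Decidable (Spec_exist_v2 board word out) := by unfold Spec_exist_v2; infer_instance

-- ===== CLAIM (what is proved, stated in full; the proofs are below) =====
def Claim_equal_exist_v2 : Prop := ∀ (board : List (List String)) (word : String), Dom_exist_v2 board word → Pre_exist_v2 board word → Spec_exist_v2 board word (exist_v2 board word)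

-- ===== LEMMAS AND PROOFS =====

lemma any_ext {α : Type} (l : List α) (f g : α → Bool) (h : ∀ x ∈ l, f x = g x) :
    l.any f = l.any g := by
  induction l with
  | nil => rfl
  | cons a t ih =>
    simp only [List.any_cons, h a List.mem_cons_self,
      ih (fun x hx => h x (List.mem_cons_of_mem a hx))]

-- one-step unfolding of dfsA for positive fuel
lemma dfsA_pos (board : List (List String)) (wl : List Char) (rl cl : Int)
    (fuel : Nat) (v : List (Int × Int)) (i j : Int) (k : Nat) (h : 1 ≤ fuel) :
    dfsA board wl rl cl fuel v i j k =
      (if pvCell board i j = String.ofList [wl.getD k ' '] then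
        if k + 1 = wl.length then true
        else
          pvDirs.any (fun d =>
            decide (0 ≤ i + d.1 ∧ i + d.1 < rl ∧ 0 ≤ j + d.2 ∧ j + d.2 < cl) &&
            !(v.contains (i + d.1, j + d.2)) &&
            dfsA board wl rl cl (fuel - 1) ((i + d.1, j + d.2) :: v) (i + d.1) (j + d.2) (k + 1))
      else false) := by
  cases fuel with
  | zero => omega
  | succ f => rfl

-- dfsA depends on its visited argument only through membership
lemma dfsA_mem_congr (board : List (List String)) (wl : List Char) (rl cl : Int) :
    ∀ (fuel : Nat) (v1 v2 : List (Int × Int)) (i j : Int) (k : Nat),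
      (∀ p, p ∈ v1 ↔ p ∈ v2) →
      dfsA board wl rl cl fuel v1 i j k = dfsA board wl rl cl fuel v2 i j k := by
  intro fuel
  induction fuel with
  | zero => intros; rfl
  | succ f IH =>
    intro v1 v2 i j k h
    simp only [dfsA]
    split_ifs with h1 h2 <;> try rfl
    apply any_ext
    intro d _
    have hc : v1.contains (i + d.1, j + d.2) = v2.contains (i + d.1, j + d.2) := by
      rw [Bool.eq_iff_iff, List.contains_iff_mem, List.contains_iff_mem]
      exact h _
    rw [hc]
    congr 1
    exact IH _ _ _ _ _ (fun p => by simp only [List.mem_cons]; rw [h p])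

-- dfsA is fuel-irrelevant above word-length depth
lemma dfsA_fuel (board : List (List String)) (wl : List Char) (rl cl : Int) :
    ∀ (f g : Nat) (v : List (Int × Int)) (i j : Int) (k : Nat),
      k < wl.length → wl.length - k ≤ f → wl.length - k ≤ g →
      dfsA board wl rl cl f v i j k = dfsA board wl rl cl g v i j k := by
  intro f
  induction f with
  | zero => intro g v i j k hk hf; omega
  | succ f IH =>
    intro g v i j k hk hf hg
    rw [dfsA_pos board wl rl cl (f + 1) v i j k (by omega),
      dfsA_pos board wl rl cl g v i j k (by omega)]
    split_ifs with h1 h2 <;> try rfl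
    apply any_ext
    intro d _
    congr 1
    by_cases hk1 : k + 1 < wl.length
    · exact IH (g - 1) _ _ _ _ hk1 (by omega) (by omega)
    · omega

-- pending work of one frame: the not-yet-tried directions, each judged by A's DFS
def tryDirs (board : List (List String)) (wl : List Char) (rl cl : Int)
    (onpL : List (Int × Int)) (i j : Int) (k d : Nat) : Bool :=
  (pvDirs.drop d).any (fun dir =>
    decide (0 ≤ i + dir.1 ∧ i + dir.1 < rl ∧ 0 ≤ j + dir.2 ∧ j + dir.2 < cl) &&
    !(onpL.contains (i + dir.1, j + dir.2)) &&
    dfsA board wl rl cl wl.length ((i + dir.1, j + dir.2) :: onpL) (i + dir.1) (j + dir.2) k)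

-- what the stack machine still has to deliver
def unwind (board : List (List String)) (wl : List Char) (rl cl : Int) :
    List (Int × Int × Nat) → PySem.Set (Int × Int) → Bool
  | [], _ => false
  | (i, j, d) :: rest, onp =>
    tryDirs board wl rl cl onp i j (rest.length + 1) d ||
      unwind board wl rl cl rest (PySem.Set.discard onp (i, j))

lemma unwind_cons (board : List (List String)) (wl : List Char) (rl cl : Int)
    (i j : Int) (d : Nat) (rest : List (Int × Int × Nat)) (onp : PySem.Set (Int × Int)) :
    unwind board wl rl cl ((i, j, d) :: rest) onp =
      (tryDirs board wl rl cl onp i j (rest.length + 1) d ||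
        unwind board wl rl cl rest (PySem.Set.discard onp (i, j))) := rfl

lemma tryDirs_mem_congr (board : List (List String)) (wl : List Char) (rl cl : Int)
    (v1 v2 : List (Int × Int)) (i j : Int) (k d : Nat)
    (h : ∀ p, p ∈ v1 ↔ p ∈ v2) :
    tryDirs board wl rl cl v1 i j k d = tryDirs board wl rl cl v2 i j k d := by
  unfold tryDirs
  apply any_ext
  intro dir _
  have hc : v1.contains (i + dir.1, j + dir.2) = v2.contains (i + dir.1, j + dir.2) := by
    rw [Bool.eq_iff_iff, List.contains_iff_mem, List.contains_iff_mem]; exact h _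
  rw [hc]
  congr 1
  exact dfsA_mem_congr board wl rl cl _ _ _ _ _ _
    (fun p => by simp only [List.mem_cons]; rw [h p])

lemma unwind_mem_congr (board : List (List String)) (wl : List Char) (rl cl : Int) :
    ∀ (st : List (Int × Int × Nat)) (s1 s2 : PySem.Set (Int × Int)),
      (∀ p, p ∈ s1 ↔ p ∈ s2) →
      unwind board wl rl cl st s1 = unwind board wl rl cl st s2 := by
  intro st
  induction st with
  | nil => intros; rfl
  | cons f rest IH =>
    rcases f with ⟨i, j, d⟩
    intro s1 s2 h
    simp only [unwind]
    have h1 := tryDirs_mem_congr board wl rl cl s1 s2 i j (rest.length + 1) d h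
    have h2 := IH (PySem.Set.discard s1 (i, j)) (PySem.Set.discard s2 (i, j))
      (fun p => by simp only [PySem.Set.mem_discard]; rw [h p])
    rw [h1, h2]

-- step of tryDirs, for d < 4
lemma tryDirs_step (board : List (List String)) (wl : List Char) (rl cl : Int)
    (onpL : List (Int × Int)) (i j : Int) (k d : Nat) (hd : d < 4) :
    tryDirs board wl rl cl onpL i j k d =
      ((decide (0 ≤ i + (pvDirs.getD d (0,0)).1 ∧ i + (pvDirs.getD d (0,0)).1 < rl ∧
          0 ≤ j + (pvDirs.getD d (0,0)).2 ∧ j + (pvDirs.getD d (0,0)).2 < cl) &&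
        !(onpL.contains (i + (pvDirs.getD d (0,0)).1, j + (pvDirs.getD d (0,0)).2)) &&
        dfsA board wl rl cl wl.length
          ((i + (pvDirs.getD d (0,0)).1, j + (pvDirs.getD d (0,0)).2) :: onpL)
          (i + (pvDirs.getD d (0,0)).1) (j + (pvDirs.getD d (0,0)).2) k) ||
      tryDirs board wl rl cl onpL i j k (d + 1)) := by
  interval_cases d <;> rfl

lemma tryDirs_four (board : List (List String)) (wl : List Char) (rl cl : Int)
    (onpL : List (Int × Int)) (i j : Int) (k : Nat) :
    tryDirs board wl rl cl onpL i j k 4 = false := rfl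

-- fuel accounting
def gcost (len d k : Nat) : Nat := (5 - d) + (4 - d) * 9 ^ (len - (k + 1))

def costStack (len : Nat) : List (Int × Int × Nat) → Nat
  | [] => 0
  | (_, _, d) :: rest => gcost len d (rest.length + 1) + costStack len rest

-- stack invariant: direction counters ≤ 4, path cells distinct and exactly the set, depth < len
def StInv (wl : List Char) (st : List (Int × Int × Nat)) (onp : PySem.Set (Int × Int)) : Prop :=
  (∀ f ∈ st, f.2.2 ≤ 4) ∧
  (st.map (fun f => (f.1, f.2.1))).Nodup ∧
  (∀ p : Int × Int, p ∈ onp ↔ p ∈ st.map (fun f => (f.1, f.2.1))) ∧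
  st.length + 1 ≤ wl.length

lemma pow9_pos (m : Nat) : 1 ≤ 9 ^ m := Nat.one_le_pow _ _ (by norm_num)

-- main simulation lemma: with enough fuel the machine computes unwind
lemma loopB_eq_unwind (board : List (List String)) (wl : List Char) (rl cl : Int) :
    ∀ (fuel : Nat) (st : List (Int × Int × Nat)) (onp : PySem.Set (Int × Int)),
      StInv wl st onp → costStack wl.length st ≤ fuel →
      loopB board wl rl cl fuel st onp = unwind board wl rl cl st onp := by
  intro fuel
  induction fuel with
  | zero =>
    rintro (_ | ⟨⟨i, j, d⟩, rest⟩) onp hInv hc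
    · rfl
    · exfalso
      simp only [costStack, gcost] at hc
      have h4 := hInv.1 (i, j, d) List.mem_cons_self
      simp only at h4
      omega
  | succ fuel IH =>
    rintro (_ | ⟨⟨i, j, d⟩, rest⟩) onp hInv hc
    · rfl
    · obtain ⟨h4, hnd, hmem, hlen⟩ := hInv
      have hd4 : d ≤ 4 := h4 (i, j, d) List.mem_cons_self
      simp only [costStack] at hc
      simp only [loopB]
      rw [unwind_cons]
      by_cases hd : d = 4
      · subst hd
        rw [if_pos rfl, tryDirs_four, Bool.false_or]
        have hnd' := hnd
        rw [List.map_cons, List.nodup_cons] at hnd'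
        apply IH rest _ _ (by simp only [gcost] at hc; omega)
        refine ⟨fun f hf => h4 f (List.mem_cons_of_mem _ hf), hnd'.2, ?_, by
          simp only [List.length_cons] at hlen; omega⟩
        intro p
        rw [PySem.Set.mem_discard, hmem p]
        simp only [List.map_cons, List.mem_cons]
        constructor
        · rintro ⟨h1 | h1, h2⟩
          · exact absurd h1 h2
          · exact h1
        · intro h1
          refine ⟨Or.inr h1, ?_⟩
          intro hpij
          rw [hpij] at h1
          exact hnd'.1 h1
      · rw [if_neg hd]
        have hdlt : d < 4 := by omega
        rw [tryDirs_step board wl rl cl onp i j (rest.length + 1) d hdlt]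
        set dir := pvDirs.getD d (0, 0) with hdir
        set ip := i + dir.1 with hip
        set jp := j + dir.2 with hjp
        have hlen' : rest.length + 2 ≤ wl.length := by
          simpa using hlen
        have hklt : rest.length + 1 < wl.length := by omega
        have hstep : gcost wl.length (d + 1) (rest.length + 1) + costStack wl.length rest ≤ fuel := by
          simp only [gcost] at hc ⊢
          have := pow9_pos (wl.length - (rest.length + 1 + 1))
          interval_cases d <;> omega
        have hInv' : StInv wl ((i, j, d + 1) :: rest) onp := by
          refine ⟨?_, by simpa using hnd, by simpa using hmem, by simpa using hlen⟩
          rintro f hf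
          rcases List.mem_cons.mp hf with rfl | hf
          · simp only; omega
          · exact h4 f (List.mem_cons_of_mem _ hf)
        by_cases hcond : (decide (0 ≤ ip ∧ ip < rl ∧ 0 ≤ jp ∧ jp < cl) &&
            !(PySem.Set.contains onp (ip, jp)) &&
            decide (pvCell board ip jp = String.ofList [wl.getD (rest.length + 1) ' '])) = true
        · rw [if_pos hcond]
          simp only [Bool.and_eq_true, Bool.not_eq_true', decide_eq_true_eq] at hcond
          obtain ⟨⟨hinb, hnmem⟩, hchar⟩ := hcond
          have hnmem' : (ip, jp) ∉ onp := by
            intro hm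
            rw [← PySem.Set.contains_iff] at hm
            rw [hm] at hnmem
            exact absurd hnmem (by decide)
          have hcfalse : List.contains onp (ip, jp) = false := hnmem
          have hhead : (decide (0 ≤ ip ∧ ip < rl ∧ 0 ≤ jp ∧ jp < cl) &&
              !(List.contains onp (ip, jp)) &&
              dfsA board wl rl cl wl.length ((ip, jp) :: onp) ip jp (rest.length + 1)) =
              dfsA board wl rl cl wl.length ((ip, jp) :: onp) ip jp (rest.length + 1) := by
            rw [decide_eq_true hinb, hcfalse]
            simp only [Bool.not_false, Bool.true_and]
          by_cases hfin : rest.length + 1 + 1 = wl.length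
          · rw [if_pos hfin]
            have hT : dfsA board wl rl cl wl.length ((ip, jp) :: onp) ip jp (rest.length + 1) = true := by
              rw [dfsA_pos board wl rl cl _ _ _ _ _ (by omega), if_pos hchar, if_pos hfin]
            rw [hhead, hT]
            simp
          · rw [if_neg hfin]
            have hInvPush : StInv wl ((ip, jp, 0) :: (i, j, d + 1) :: rest) (PySem.Set.add onp (ip, jp)) := by
              refine ⟨?_, ?_, ?_, by simp only [List.length_cons]; omega⟩
              · rintro f hf
                rcases List.mem_cons.mp hf with rfl | hf
                · simp
                · exact hInv'.1 f hf
              · simp only [List.map_cons, List.nodup_cons]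
                refine ⟨?_, by simpa using hnd⟩
                intro hmm
                exact hnmem' ((hmem (ip, jp)).mpr (by simpa using hmm))
              · intro p
                rw [PySem.Set.mem_add, hmem p]
                simp only [List.map_cons, List.mem_cons]
                tauto
            have hcostPush : costStack wl.length ((ip, jp, 0) :: (i, j, d + 1) :: rest) ≤ fuel := by
              simp only [costStack, List.length_cons, gcost] at hc ⊢
              have e1 : wl.length - (rest.length + 1 + 1) = (wl.length - (rest.length + 1 + 1 + 1)) + 1 := by
                omega
              rw [e1, pow_succ] at hc ⊢
              have := pow9_pos (wl.length - (rest.length + 1 + 1 + 1))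
              interval_cases d <;> omega
            rw [IH _ _ hInvPush hcostPush, unwind_cons]
            have hdis := unwind_mem_congr board wl rl cl ((i, j, d + 1) :: rest)
              (PySem.Set.discard (PySem.Set.add onp (ip, jp)) (ip, jp)) onp
              (fun p => by
                rw [PySem.Set.mem_discard, PySem.Set.mem_add]
                constructor
                · rintro ⟨h1 | h1, h2⟩
                  · exact h1
                  · exact absurd h1 h2
                · intro h1
                  exact ⟨Or.inl h1, fun hpe => hnmem' (hpe ▸ h1)⟩)
            rw [List.length_cons, hdis, unwind_cons]
            -- head term = tryDirs of the pushed child frame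
            have hchild : tryDirs board wl rl cl (PySem.Set.add onp (ip, jp)) ip jp (rest.length + 1 + 1) 0 =
                dfsA board wl rl cl wl.length ((ip, jp) :: onp) ip jp (rest.length + 1) := by
              rw [dfsA_pos board wl rl cl _ _ _ _ _ (by omega), if_pos hchar, if_neg hfin]
              unfold tryDirs
              simp only [List.drop_zero]
              apply any_ext
              intro e _
              have hcc : List.contains (PySem.Set.add onp (ip, jp)) (ip + e.1, jp + e.2)
                  = List.contains ((ip, jp) :: onp) (ip + e.1, jp + e.2) := by
                rw [Bool.eq_iff_iff, List.contains_iff_mem, List.contains_iff_mem,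
                  PySem.Set.mem_add, List.mem_cons]
                tauto
              rw [hcc]
              congr 1
              refine (dfsA_mem_congr board wl rl cl _ _ _ _ _ _ ?_).trans
                (dfsA_fuel board wl rl cl _ _ _ _ _ _ (by omega) (by omega) (by omega))
              intro p
              simp only [List.mem_cons, PySem.Set.mem_add]
              tauto
            rw [← hchild] at hhead ⊢
            rw [hhead, Bool.or_assoc]
        · rw [if_neg hcond]
          rw [IH _ _ hInv' hstep, unwind_cons]
          -- the skipped head term is false
          simp only [Bool.and_eq_true, Bool.not_eq_true', decide_eq_true_eq, not_and] at hcond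
          have hhead : (decide (0 ≤ ip ∧ ip < rl ∧ 0 ≤ jp ∧ jp < cl) &&
              !(List.contains onp (ip, jp)) &&
              dfsA board wl rl cl wl.length ((ip, jp) :: onp) ip jp (rest.length + 1)) = false := by
            by_cases hb1 : (0 ≤ ip ∧ ip < rl ∧ 0 ≤ jp ∧ jp < cl)
            · cases hb2 : List.contains onp (ip, jp) with
              | true => simp
              | false =>
                have hcf : ¬ (pvCell board ip jp = String.ofList [wl.getD (rest.length + 1) ' ']) := by
                  first
                  | exact hcond hb1 hb2
                  | exact hcond ⟨hb1, hb2⟩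
                have hF : dfsA board wl rl cl wl.length ((ip, jp) :: onp) ip jp (rest.length + 1) = false := by
                  rw [dfsA_pos board wl rl cl _ _ _ _ _ (by omega), if_neg hcf]
                simp [hF]
            · simp [decide_eq_false hb1]
          rw [hhead]
          simp

-- per-start-cell equality
lemma start_eq (board : List (List String)) (wl : List Char) (rl cl : Int)
    (hw : wl ≠ []) (i j : Int) :
    dfsA board wl rl cl wl.length [(i, j)] i j 0 =
      (if pvCell board i j ≠ String.ofList [wl.getD 0 ' '] then false
       else if wl.length = 1 then true
       else loopB board wl rl cl (9 ^ wl.length) [(i, j, 0)] (PySem.Set.ofList [(i, j)])) := by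
  have hlen : 1 ≤ wl.length := by
    cases wl with
    | nil => exact absurd rfl hw
    | cons a t => simp
  by_cases hchar : pvCell board i j = String.ofList [wl.getD 0 ' ']
  · rw [if_neg (not_not_intro hchar)]
    by_cases h1 : wl.length = 1
    · rw [if_pos h1, dfsA_pos board wl rl cl _ _ _ _ _ (by omega), if_pos hchar,
        if_pos (by omega)]
    · rw [if_neg h1]
      have hlen2 : 2 ≤ wl.length := by omega
      have hofl : PySem.Set.ofList [(i, j)] = ([(i, j)] : List (Int × Int)) :=
        PySem.Set.ofList_eq_self_of_nodup _ (List.nodup_singleton _)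
      have hInv0 : StInv wl [(i, j, 0)] (PySem.Set.ofList [(i, j)]) := by
        refine ⟨by simp, by simp, ?_, by simpa using hlen2⟩
        intro p
        rw [hofl]
        simp
      have hcost0 : costStack wl.length [(i, j, 0)] ≤ 9 ^ wl.length := by
        simp only [costStack, gcost, List.length_nil]
        have e2 : (9 : Nat) ^ wl.length = 9 ^ (wl.length - (0 + 1 + 1)) * 9 * 9 := by
          rw [← pow_succ, ← pow_succ]
          congr 1
          omega
        rw [e2]
        have := pow9_pos (wl.length - (0 + 1 + 1))
        omega
      rw [loopB_eq_unwind board wl rl cl _ _ _ hInv0 hcost0, unwind_cons]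
      simp only [unwind, Bool.or_false, List.length_nil, Nat.zero_add]
      rw [dfsA_pos board wl rl cl _ _ _ _ _ (by omega), if_pos hchar, if_neg (by omega : ¬ 0 + 1 = wl.length)]
      unfold tryDirs
      simp only [List.drop_zero]
      apply any_ext
      intro e _
      have hcc : List.contains (PySem.Set.ofList [(i, j)]) (i + e.1, j + e.2)
          = List.contains ([(i, j)] : List (Int × Int)) (i + e.1, j + e.2) := by
        rw [hofl]
      rw [hcc]
      congr 1
      refine (dfsA_mem_congr board wl rl cl _ _ _ _ _ _ ?_).trans
        (dfsA_fuel board wl rl cl _ _ _ _ _ _ (by omega) (by omega) (by omega))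
      intro p
      rw [hofl]
  · rw [if_pos hchar, dfsA_pos board wl rl cl _ _ _ _ _ (by omega), if_neg hchar]

-- ===== VERDICT (by name: the statement is the Claim_ definition above) =====
theorem exist_v2_spec : Claim_equal_exist_v2 := by
  intro board word _ hpre
  obtain ⟨-, hwne, -⟩ := hpre
  have hw : word.toList ≠ [] := by
    intro h
    apply hwne
    have h2 := congrArg String.ofList h
    rw [String.ofList_toList] at h2
    simpa using h2
  show exist_v2 board word = exist_v2_alt board word
  unfold exist_v2 exist_v2_alt
  apply any_ext
  intro i _
  apply any_ext
  intro j _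
  exact start_eq board word.toList (board.length : Int) ((board.getD 0 []).length : Int) hw i j
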